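-- pv_equiv track=rewrite | github.com/mhammadsaani/python-revision | 1. coding/1. Step 1/1.6_basic_hashing.py | frequencey_of_limited_range_array
-- ===== SOURCE A (Python) =====
-- def frequencey_of_limited_range_array(_list, n):
--     dic = {}
--     for num in _list:
--         dic[num] = dic.get(num, 0) + 1
--     result_list = []
--     for i in range(1, n+1):
--         result_list.append(dic.get(i, 0))
--     return result_list
-- ===== SOURCE B (Python) =====
-- def frequencey_of_limited_range_array(_list, n):
--     # sort the in-range values, then one merge-style scan over the sorted run
--     # structure produces the counts for 1..n in order
--     s = sorted(x for x in _list if 1 <= x <= n)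
--     result = []
--     j = 0
--     for v in range(1, n + 1):
--         c = 0
--         while j < len(s) and s[j] == v:
--             c += 1
--             j += 1
--         result.append(c)
--     return result
-- ===== Notes on version B (the rewrite author's own statement) =====
-- stated objective: alternative
-- what changed: Replaces hash-table counting (dict build, then reads) by sort-then-merge-scan: filter the in-range values, sort them, and emit each value's count for 1..n by advancing a single pointer over the consecutive runs of the sorted list.
import Mathlib
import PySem

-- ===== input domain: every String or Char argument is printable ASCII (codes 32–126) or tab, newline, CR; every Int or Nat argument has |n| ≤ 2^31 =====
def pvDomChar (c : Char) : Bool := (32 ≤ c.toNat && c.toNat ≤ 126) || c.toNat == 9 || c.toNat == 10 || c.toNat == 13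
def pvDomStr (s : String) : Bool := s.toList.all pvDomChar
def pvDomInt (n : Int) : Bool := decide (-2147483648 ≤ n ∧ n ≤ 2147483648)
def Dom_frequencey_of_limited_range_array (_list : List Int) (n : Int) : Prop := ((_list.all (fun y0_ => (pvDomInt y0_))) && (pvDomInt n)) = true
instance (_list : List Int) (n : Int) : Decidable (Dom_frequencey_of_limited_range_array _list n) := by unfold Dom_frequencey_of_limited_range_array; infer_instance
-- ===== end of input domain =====

-- B replaces A's hash-table counting by sort-then-merge-scan: sort the in-range values and read off each run length.

-- ===== PORT A =====
def frequencey_of_limited_range_array (_list : List Int) (n : Int) : List Int :=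
  let dic := _list.foldl (fun d num => d.insert num (d.getD num 0 + 1)) PySem.Dict.empty
  (PySem.List.pyRange 1 (n + 1) 1).foldl (fun result_list i => result_list ++ [dic.getD i 0]) []

-- ===== PORT B =====
-- the inner `while j < len(s) and s[j] == v` pointer loop: the position j is the remaining
-- suffix of s; returns (run length c, suffix after the run)
def pvRun (v : Int) : List Int → Int × List Int
  | [] => (0, [])
  | x :: rest => if x = v then ((pvRun v rest).1 + 1, (pvRun v rest).2) else (0, x :: rest)

def frequencey_of_limited_range_array_alt (_list : List Int) (n : Int) : List Int :=
  let s := PySem.List.sorted (_list.filter (fun x => decide (1 ≤ x ∧ x ≤ n))) (fun x => x) false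
  ((PySem.List.pyRange 1 (n + 1) 1).foldl
    (fun (st : List Int × List Int) v =>
      let q := pvRun v st.2
      (st.1 ++ [q.1], q.2)) ([], s)).1

-- ===== PRECONDITION & SPEC =====
def Spec_frequencey_of_limited_range_array (_list : List Int) (n : Int) (out : List Int) : Prop := out = frequencey_of_limited_range_array_alt _list n
instance (_list : List Int) (n : Int) (out : List Int) : Decidable (Spec_frequencey_of_limited_range_array _list n out) := by unfold Spec_frequencey_of_limited_range_array; infer_instance

-- ===== CLAIM (what is proved, stated in full; the proofs are below) =====
def Claim_equal_frequencey_of_limited_range_array : Prop := ∀ (_list : List Int) (n : Int), Dom_frequencey_of_limited_range_array _list n → Spec_frequencey_of_limited_range_array _list n (frequencey_of_limited_range_array _list n)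

-- ===== LEMMAS AND PROOFS =====

-- on a sorted list whose elements are all ≥ v, the run scan returns the count of v,
-- and the leftover suffix is sorted, bounded below by v+1, with other counts unchanged
theorem pvRun_spec (v : Int) : ∀ (s : List Int), s.Pairwise (· ≤ ·) → (∀ x ∈ s, v ≤ x) →
    (pvRun v s).1 = (s.count v : Int) ∧ (pvRun v s).2.Pairwise (· ≤ ·) ∧
    (∀ x ∈ (pvRun v s).2, v + 1 ≤ x) ∧ ∀ w, w ≠ v → (pvRun v s).2.count w = s.count w := by
  intro s
  induction s with
  | nil => intro _ _; simp [pvRun]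
  | cons x rest ih =>
    intro hs hb
    by_cases hx : x = v
    · subst hx
      obtain ⟨h1, h2, h3, h4⟩ := ih (List.Pairwise.of_cons hs) (fun y hy => hb y (by simp [hy]))
      refine ⟨?_, ?_, ?_, ?_⟩
      · simp [pvRun, h1]
      · simpa [pvRun] using h2
      · simpa [pvRun] using h3
      · intro w hw
        have := h4 w hw
        simp only [pvRun, if_true] at this ⊢
        rw [this, List.count_cons]
        simp [Ne.symm hw]
    · have hgt : v < x := lt_of_le_of_ne (hb x (by simp)) (fun h => hx h.symm)
      simp only [pvRun, if_neg hx]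
      refine ⟨?_, hs, ?_, fun w _ => by simp⟩
      · have : (x :: rest).count v = 0 := by
          rw [List.count_eq_zero]
          intro hv
          rcases List.mem_cons.mp hv with h | h
          · exact hx h.symm
          · have := (List.pairwise_cons.mp hs).1 v h
            omega
        simp [this]
      · intro y hy
        rcases List.mem_cons.mp hy with h | h
        · omega
        · have := (List.pairwise_cons.mp hs).1 y h
          omega

-- the outer for-loop over v = a..b-1: on a sorted suffix bounded below by a,
-- it appends exactly the counts of a..b-1
theorem pvScan_spec (b : Int) : ∀ (a : Int) (s acc : List Int),
    s.Pairwise (· ≤ ·) → (∀ x ∈ s, a ≤ x) →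
    ((PySem.List.pyRange a b 1).foldl
      (fun (st : List Int × List Int) v =>
        let q := pvRun v st.2
        (st.1 ++ [q.1], q.2)) (acc, s)).1
    = acc ++ (PySem.List.pyRange a b 1).map (fun w => (s.count w : Int)) := by
  intro a
  by_cases hab : b ≤ a
  · intro s acc _ _; simp [PySem.List.pyRange_one_eq_nil hab]
  · rw [not_le] at hab
    have hfuel : ∀ (k : Nat) (a : Int), (b - a).toNat = k → ∀ (s acc : List Int),
        s.Pairwise (· ≤ ·) → (∀ x ∈ s, a ≤ x) →
        ((PySem.List.pyRange a b 1).foldl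
          (fun (st : List Int × List Int) v =>
            let q := pvRun v st.2
            (st.1 ++ [q.1], q.2)) (acc, s)).1
        = acc ++ (PySem.List.pyRange a b 1).map (fun w => (s.count w : Int)) := by
      intro k
      induction k with
      | zero =>
        intro a hk s acc _ _
        simp [PySem.List.pyRange_one_eq_nil (by omega : b ≤ a)]
      | succ m ihm =>
        intro a hk s acc hs hb'
        have hlt : a < b := by omega
        obtain ⟨h1, h2, h3, h4⟩ := pvRun_spec a s hs hb'
        rw [PySem.List.pyRange_one_cons hlt]
        simp only [List.foldl_cons, List.map_cons]
        rw [ihm (a + 1) (by omega) (pvRun a s).2 (acc ++ [(pvRun a s).1]) h2 h3, h1]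
        rw [List.map_congr_left (fun w hw => by
          rw [h4 w (by
            have := (PySem.List.mem_pyRange_one.mp hw).1
            omega)])]
        simp
    exact fun s acc => hfuel (b - a).toNat a rfl s acc

-- ===== VERDICT (by name: the statement is the Claim_ definition above) =====
theorem frequencey_of_limited_range_array_spec : Claim_equal_frequencey_of_limited_range_array := by
  intro _list n _
  unfold Spec_frequencey_of_limited_range_array
  unfold frequencey_of_limited_range_array frequencey_of_limited_range_array_alt
  rw [PySem.List.foldl_append_singleton_eq_map, List.nil_append]
  set s := PySem.List.sorted (_list.filter (fun x => decide (1 ≤ x ∧ x ≤ n))) (fun x => x) false with hsdef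
  have hsorted : s.Pairwise (· ≤ ·) := by
    exact PySem.List.sorted_pairwise (_list.filter (fun x => decide (1 ≤ x ∧ x ≤ n))) (fun x => x)
  have hbound : ∀ x ∈ s, (1 : Int) ≤ x := by
    intro x hx
    have : x ∈ _list.filter (fun x => decide (1 ≤ x ∧ x ≤ n)) := by
      rw [hsdef] at hx
      exact (PySem.List.mem_sorted _ _ _ _).mp hx
    have := List.of_mem_filter this
    simp at this
    exact this.1
  rw [pvScan_spec (n + 1) 1 s [] hsorted hbound, List.nil_append]
  apply List.map_congr_left
  intro i hi
  obtain ⟨hi1, hi2⟩ := PySem.List.mem_pyRange_one.mp hi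
  rw [PySem.Dict.getD_foldl_insert_add_one, PySem.Dict.getD_empty, zero_add]
  have hperm : s.Perm (_list.filter (fun x => decide (1 ≤ x ∧ x ≤ n))) :=
    PySem.List.sorted_perm _ _ _
  rw [hperm.count_eq, List.count_filter (by simp; omega)]
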